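-- pv_equiv track=rewrite | github.com/ifyjakande/logistikus-sheet-audit | audit_sheet.py | normalize_month
-- ===== SOURCE A (Python) =====
-- from typing import Optional, Union
--
-- MONTHS_SHORT = ["Jan", "Feb", "Mar", "Apr", "May", "Jun",
--                 "Jul", "Aug", "Sep", "Oct", "Nov", "Dec"]
--
-- MONTHS_LONG = ["January", "February", "March", "April", "May", "June",
--                "July", "August", "September", "October", "November", "December"]
--
-- def normalize_month(token: str) -> Optional[str]:
--     """Canonical 3-letter month, or None if the token is ambiguous."""
--     t = token.strip().lower()
--     if not t:
--         return None
--     for s in MONTHS_SHORT: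
--         if t == s.lower():
--             return s
--     for long_name, short in zip(MONTHS_LONG, MONTHS_SHORT):
--         if t == long_name.lower():
--             return short
--     short_prefix = [s for s in MONTHS_SHORT if s.lower().startswith(t)]
--     if len(short_prefix) == 1:
--         return short_prefix[0]
--     long_prefix = [short for long_name, short in zip(MONTHS_LONG, MONTHS_SHORT)
--                    if long_name.lower().startswith(t)]
--     if len(long_prefix) == 1:
--         return long_prefix[0]
--     return None
-- ===== SOURCE B (Python) =====
-- MONTHS_SHORT = ["Jan", "Feb", "Mar", "Apr", "May", "Jun",
--                 "Jul", "Aug", "Sep", "Oct", "Nov", "Dec"]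
--
-- MONTHS_LONG = ["January", "February", "March", "April", "May", "June",
--                "July", "August", "September", "October", "November", "December"]
--
-- def normalize_month(token):
--     """Canonical 3-letter month, or None if the token is ambiguous."""
--     t = token.strip().lower()
--     matches = set()
--     for long_name, short in zip(MONTHS_LONG, MONTHS_SHORT):
--         if t and (short.lower().startswith(t) or long_name.lower().startswith(t)):
--             matches.add(short)
--     if len(matches) == 1:
--         return matches.pop()
--     return None
-- ===== Notes on version B (the rewrite author's own statement) =====
-- stated objective: simpler
-- what changed: A's five sequential return paths (two exact-match loops, then two separate prefix-filter passes over shorts and longs) are replaced by a single loop over zip(MONTHS_LONG, MONTHS_SHORT) that collects into a set every month whose short or long name starts with the token, returning the sole match; exact matches are subsumed because each short name is the first three letters of its long name.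
import Mathlib
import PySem

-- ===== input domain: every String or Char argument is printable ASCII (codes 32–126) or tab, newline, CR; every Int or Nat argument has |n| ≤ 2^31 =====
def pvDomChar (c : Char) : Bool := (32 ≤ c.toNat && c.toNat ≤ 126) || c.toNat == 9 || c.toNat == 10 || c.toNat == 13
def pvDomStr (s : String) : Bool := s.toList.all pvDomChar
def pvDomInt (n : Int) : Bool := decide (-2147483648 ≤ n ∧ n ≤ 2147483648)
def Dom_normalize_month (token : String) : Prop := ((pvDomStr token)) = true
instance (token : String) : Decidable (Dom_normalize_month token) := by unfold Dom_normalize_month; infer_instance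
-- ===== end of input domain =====

-- B replaces A's five sequential return paths (two exact-match loops, two prefix-filter passes)
-- by one pass over zip(MONTHS_LONG, MONTHS_SHORT) collecting prefix-matched months into a set
-- (objective: simpler decomposition; not claimed faster).

def MONTHS_SHORT : List String := ["Jan", "Feb", "Mar", "Apr", "May", "Jun",
                                   "Jul", "Aug", "Sep", "Oct", "Nov", "Dec"]

def MONTHS_LONG : List String := ["January", "February", "March", "April", "May", "June",
                                  "July", "August", "September", "October", "November", "December"]

-- ===== PORT A =====
-- works on List Char (PySem string model); normalize_month wraps strip/lower as in Python
def normalize_month_core (t : List Char) : Option String :=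
  if t = [] then none
  else
    match MONTHS_SHORT.find? (fun s => t == PySem.Chars.lower s.toList) with
    | some s => some s
    | none =>
      match (MONTHS_LONG.zip MONTHS_SHORT).find? (fun p => t == PySem.Chars.lower p.1.toList) with
      | some p => some p.2
      | none =>
        let short_prefix := MONTHS_SHORT.filter (fun s => PySem.Chars.startswith (PySem.Chars.lower s.toList) t)
        if short_prefix.length = 1 then short_prefix[0]?
        else
          let long_prefix := ((MONTHS_LONG.zip MONTHS_SHORT).filter
              (fun p => PySem.Chars.startswith (PySem.Chars.lower p.1.toList) t)).map Prod.snd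
          if long_prefix.length = 1 then long_prefix[0]? else none

def normalize_month (token : String) : Option String :=
  normalize_month_core (PySem.Chars.lower (PySem.Chars.strip token.toList))

-- ===== PORT B =====
def normalize_month_alt_core (t : List Char) : Option String :=
  let ms : PySem.Set String :=
    (MONTHS_LONG.zip MONTHS_SHORT).foldl
      (fun (acc : PySem.Set String) p =>
        if !t.isEmpty && (PySem.Chars.startswith (PySem.Chars.lower p.2.toList) t
              || PySem.Chars.startswith (PySem.Chars.lower p.1.toList) t)
        then PySem.Set.add acc p.2 else acc)
      (PySem.Set.ofList [])
  if ms.length = 1 then ms[0]? else none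

def normalize_month_alt (token : String) : Option String :=
  normalize_month_alt_core (PySem.Chars.lower (PySem.Chars.strip token.toList))

-- ===== PRECONDITION & SPEC =====
def Spec_normalize_month (token : String) (out : Option String) : Prop := out = normalize_month_alt token
instance (token : String) (out : Option String) : Decidable (Spec_normalize_month token out) := by unfold Spec_normalize_month; infer_instance

-- ===== CLAIM (what is proved, stated in full; the proofs are below) =====
def Claim_equal_normalize_month : Prop := ∀ (token : String), Dom_normalize_month token → Spec_normalize_month token (normalize_month token)

-- ===== LEMMAS AND PROOFS =====

-- the lowered long names, as literal char lists
def longsLow : List (List Char) :=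
  [['j','a','n','u','a','r','y'], ['f','e','b','r','u','a','r','y'], ['m','a','r','c','h'],
   ['a','p','r','i','l'], ['m','a','y'], ['j','u','n','e'], ['j','u','l','y'],
   ['a','u','g','u','s','t'], ['s','e','p','t','e','m','b','e','r'], ['o','c','t','o','b','e','r'],
   ['n','o','v','e','m','b','e','r'], ['d','e','c','e','m','b','e','r']]

-- t matches something in either program only if t is a prefix of some lowered long name
def hasPrefixMatch (t : List Char) : Bool := longsLow.any (fun l => t.isPrefixOf l)

lemma prefix_match_of_eq_or_prefix {t x : List Char} (hx : longsLow.any (fun l => x.isPrefixOf l) = true)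
    (h : t = x ∨ t <+: x) : hasPrefixMatch t = true := by
  simp only [List.any_eq_true, List.isPrefixOf_iff_prefix, hasPrefixMatch] at hx ⊢
  obtain ⟨l, hl, hxl⟩ := hx
  have ht : t <+: l := by
    rcases h with rfl | h
    · exact hxl
    · exact h.trans hxl
  exact ⟨l, hl, ht⟩

lemma match_case : ∀ t ∈ longsLow.flatMap List.inits,
    normalize_month_core t = normalize_month_alt_core t := by decide

lemma nomatch_case (t : List Char) (h : hasPrefixMatch t = false) :
    normalize_month_core t = none ∧ normalize_month_alt_core t = none := by
  have keyEqN : ∀ x : List Char, longsLow.any (fun l => x.isPrefixOf l) = true →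
      ¬ ((t == x) = true) := by
    intro x hx he
    rw [prefix_match_of_eq_or_prefix hx (Or.inl (by simpa using he))] at h
    simp at h
  have keySwF : ∀ x : List Char, longsLow.any (fun l => x.isPrefixOf l) = true →
      PySem.Chars.startswith x t = false := by
    intro x hx
    rcases hbs : PySem.Chars.startswith x t with _ | _
    · rfl
    · have hp : t <+: x := (PySem.Chars.startswith_iff x t).mp hbs
      rw [prefix_match_of_eq_or_prefix hx (Or.inr hp)] at h
      simp at h
  have keySwN : ∀ x : List Char, longsLow.any (fun l => x.isPrefixOf l) = true →
      ¬ (PySem.Chars.startswith x t = true) := by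
    intro x hx he; rw [keySwF x hx] at he; exact Bool.false_ne_true he
  have ht : t ≠ [] := by
    intro he; subst he; revert h; decide
  constructor
  · -- A returns none: every exact-match and prefix check is false
    have hfind1 : MONTHS_SHORT.find? (fun s => t == PySem.Chars.lower s.toList) = none := by
      rw [List.find?_eq_none]
      intro s hs
      fin_cases hs <;> exact keyEqN _ (by decide)
    have hfind2 : (MONTHS_LONG.zip MONTHS_SHORT).find? (fun p => t == PySem.Chars.lower p.1.toList) = none := by
      rw [List.find?_eq_none]
      intro p hp
      fin_cases hp <;> exact keyEqN _ (by decide)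
    have hfilt1 : MONTHS_SHORT.filter (fun s => PySem.Chars.startswith (PySem.Chars.lower s.toList) t) = [] := by
      rw [List.filter_eq_nil_iff]
      intro s hs
      fin_cases hs <;> exact keySwN _ (by decide)
    have hfilt2 : (MONTHS_LONG.zip MONTHS_SHORT).filter
        (fun p => PySem.Chars.startswith (PySem.Chars.lower p.1.toList) t) = [] := by
      rw [List.filter_eq_nil_iff]
      intro p hp
      fin_cases hp <;> exact keySwN _ (by decide)
    simp [normalize_month_core, ht, hfind1, hfind2, hfilt1, hfilt2]
  · -- B returns none: the loop condition is false for every month, so the set stays empty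
    have hfold : ∀ (L : List (String × String)) (acc : PySem.Set String),
        (∀ p ∈ L, (PySem.Chars.startswith (PySem.Chars.lower p.2.toList) t
              || PySem.Chars.startswith (PySem.Chars.lower p.1.toList) t) = false) →
        L.foldl (fun (acc : PySem.Set String) p =>
          if !t.isEmpty && (PySem.Chars.startswith (PySem.Chars.lower p.2.toList) t
                || PySem.Chars.startswith (PySem.Chars.lower p.1.toList) t)
          then PySem.Set.add acc p.2 else acc) acc = acc := by
      intro L
      induction L with
      | nil => intro acc _; rfl
      | cons a as ih =>
        intro acc hc
        simp only [List.foldl_cons, hc a (by simp), Bool.and_false, if_neg Bool.false_ne_true]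
        exact ih acc (fun p hp => hc p (by simp [hp]))
    have hcond : ∀ p ∈ MONTHS_LONG.zip MONTHS_SHORT,
        (PySem.Chars.startswith (PySem.Chars.lower p.2.toList) t
              || PySem.Chars.startswith (PySem.Chars.lower p.1.toList) t) = false := by
      intro p hp
      fin_cases hp <;>
        (simp only [Bool.or_eq_false_iff]; exact ⟨keySwF _ (by decide), keySwF _ (by decide)⟩)
    simp only [normalize_month_alt_core]
    rw [hfold _ _ hcond]
    rfl

-- ===== VERDICT (by name: the statement is the Claim_ definition above) =====
theorem normalize_month_spec : Claim_equal_normalize_month := by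
  intro token _
  unfold Spec_normalize_month normalize_month normalize_month_alt
  set t := PySem.Chars.lower (PySem.Chars.strip token.toList) with ht
  rcases hm : hasPrefixMatch t with _ | _
  · rw [(nomatch_case t hm).1, (nomatch_case t hm).2]
  · have hmem : t ∈ longsLow.flatMap List.inits := by
      simp only [hasPrefixMatch, List.any_eq_true, List.isPrefixOf_iff_prefix] at hm
      obtain ⟨l, hl, hp⟩ := hm
      simp only [List.mem_flatMap]
      exact ⟨l, hl, (List.mem_inits t l).mpr hp⟩
    exact match_case t hmem
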